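-- pv_equiv track=rewrite | github.com/chris-salapare/pythondecal | homework3.py | decode_numbers
-- ===== SOURCE A (Python) =====
-- def decode_numbers(n):
--     if n < 10:
--         return n
--
--     last_digit = n % 10
--     remaining_number = n // 10
--
--     num_digits = 0
--     temp = remaining_number
--     while temp > 0:
--         temp //= 10
--         num_digits += 1
--
--
--     new_number = last_digit * (10 ** num_digits) + remaining_number
--
--     return new_number
-- ===== SOURCE B (Python) =====
-- def decode_numbers(n):
--     if n < 10:
--         return n
--     return _prepend(n % 10, n // 10)
--
-- def _prepend(d, m):
--     # number whose decimal digits are d followed by the digits of m (m >= 1)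
--     if m < 10:
--         return d * 10 + m
--     return _prepend(d, m // 10) * 10 + m % 10
-- ===== Notes on version B (the rewrite author's own statement) =====
-- stated objective: alternative
-- what changed: Replaces A's two staged passes (a loop counting the digits of n//10, then 10**num_digits and one arithmetic combination) by a single structural recursion _prepend(d, m) that rebuilds m digit by digit with d spliced in front; no digit count and no power of ten is ever computed.
import Mathlib
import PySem

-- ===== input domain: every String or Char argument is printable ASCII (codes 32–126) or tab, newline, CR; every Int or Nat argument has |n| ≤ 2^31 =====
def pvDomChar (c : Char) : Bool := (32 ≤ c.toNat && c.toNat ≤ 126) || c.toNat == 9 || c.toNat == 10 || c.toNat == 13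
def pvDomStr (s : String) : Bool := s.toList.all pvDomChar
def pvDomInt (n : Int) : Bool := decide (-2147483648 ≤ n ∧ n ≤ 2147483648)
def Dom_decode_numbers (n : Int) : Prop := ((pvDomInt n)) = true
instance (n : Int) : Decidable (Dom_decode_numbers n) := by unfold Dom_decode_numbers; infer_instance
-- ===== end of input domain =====

-- B replaces A's two staged passes (count the digits of n//10, then 10**num_digits and one
-- arithmetic combination) by a single structural recursion splicing the last digit in front
-- (objective: alternative; same cost).

-- ===== PORT A =====
-- the 'while temp > 0: temp //= 10; num_digits += 1' loop of A
def pvCountLoop (temp num : Int) : Int :=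
  if h : 0 < temp then pvCountLoop (PySem.Int.floordiv temp 10) (num + 1) else num
termination_by temp.toNat
decreasing_by
  rw [PySem.Int.floordiv_eq_ediv_of_pos (by omega)]
  omega

def decode_numbers (n : Int) : Int :=
  if n < 10 then n
  else
    let last_digit := PySem.Int.mod n 10
    let remaining_number := PySem.Int.floordiv n 10
    let num_digits := pvCountLoop remaining_number 0
    -- 10 ** num_digits: num_digits is a loop counter, hence nonnegative; .toNat is exact here
    last_digit * 10 ^ num_digits.toNat + remaining_number

-- ===== PORT B =====
-- Source B's _prepend: the number whose decimal digits are d followed by the digits of m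
def pvPrepend (d m : Int) : Int :=
  if h : m < 10 then d * 10 + m
  else pvPrepend d (PySem.Int.floordiv m 10) * 10 + PySem.Int.mod m 10
termination_by m.toNat
decreasing_by
  rw [PySem.Int.floordiv_eq_ediv_of_pos (by omega)]
  omega

def decode_numbers_alt (n : Int) : Int :=
  if n < 10 then n
  else pvPrepend (PySem.Int.mod n 10) (PySem.Int.floordiv n 10)

-- ===== PRECONDITION & SPEC =====
def Spec_decode_numbers (n : Int) (out : Int) : Prop := out = decode_numbers_alt n
instance (n : Int) (out : Int) : Decidable (Spec_decode_numbers n out) := by unfold Spec_decode_numbers; infer_instance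

-- ===== CLAIM (what is proved, stated in full; the proofs are below) =====
def Claim_equal_decode_numbers : Prop := ∀ (n : Int), Dom_decode_numbers n → Spec_decode_numbers n (decode_numbers n)

-- ===== LEMMAS AND PROOFS =====

-- one-step unfolding of the loops/recursions (the recursors' dite written as ite)
theorem pvCountLoop_unfold (temp num : Int) :
    pvCountLoop temp num =
      if 0 < temp then pvCountLoop (PySem.Int.floordiv temp 10) (num + 1) else num := by
  rw [pvCountLoop.eq_def]
  simp only [dite_eq_ite]

theorem pvPrepend_unfold (d m : Int) :
    pvPrepend d m =
      if m < 10 then d * 10 + m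
      else pvPrepend d (PySem.Int.floordiv m 10) * 10 + PySem.Int.mod m 10 := by
  rw [pvPrepend.eq_def]
  simp only [dite_eq_ite]

-- the accumulator of A's counting loop is additive (fuel k bounds the recursion depth)
theorem pvCountLoop_acc_aux : ∀ (k : Nat) (temp num : Int), temp.toNat ≤ k →
    pvCountLoop temp num = pvCountLoop temp 0 + num := by
  intro k
  induction k with
  | zero =>
      intro temp num hk
      have hnp : ¬ 0 < temp := by omega
      rw [pvCountLoop_unfold, if_neg hnp, pvCountLoop_unfold, if_neg hnp]
      ring
  | succ k ih =>
      intro temp num hk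
      by_cases hp : 0 < temp
      · have hd : (PySem.Int.floordiv temp 10).toNat ≤ k := by
          rw [PySem.Int.floordiv_eq_ediv_of_pos (by omega)]
          omega
        rw [pvCountLoop_unfold, pvCountLoop_unfold temp 0, if_pos hp, if_pos hp, ih _ _ hd, ih _ (0 + 1) hd]
        ring
      · rw [pvCountLoop_unfold, pvCountLoop_unfold temp 0, if_neg hp, if_neg hp]
        ring

theorem pvCountLoop_acc (temp num : Int) : pvCountLoop temp num = pvCountLoop temp 0 + num :=
  pvCountLoop_acc_aux temp.toNat temp num le_rfl

theorem pvCountLoop_nonneg_aux : ∀ (k : Nat) (temp : Int), temp.toNat ≤ k →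
    0 ≤ pvCountLoop temp 0 := by
  intro k
  induction k with
  | zero =>
      intro temp hk
      rw [pvCountLoop, dif_neg (by omega)]
  | succ k ih =>
      intro temp hk
      by_cases hp : 0 < temp
      · have hd : (PySem.Int.floordiv temp 10).toNat ≤ k := by
          rw [PySem.Int.floordiv_eq_ediv_of_pos (by omega)]
          omega
        rw [pvCountLoop_unfold, if_pos hp, pvCountLoop_acc]
        have := ih _ hd
        omega
      · rw [pvCountLoop_unfold, if_neg hp]

theorem pvCountLoop_nonneg (temp : Int) : 0 ≤ pvCountLoop temp 0 :=
  pvCountLoop_nonneg_aux temp.toNat temp le_rfl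

-- B's recursion equals A's 'digit * 10^count + rest' formula for every positive rest
-- (fuel k bounds the recursion depth)
theorem pvPrepend_eq_aux : ∀ (k : Nat) (d m : Int), 0 < m → m.toNat ≤ k →
    pvPrepend d m = d * 10 ^ (pvCountLoop m 0).toNat + m := by
  intro k
  induction k with
  | zero => intro d m hm hk; omega
  | succ k ih =>
      intro d m hm hk
      by_cases hs : m < 10
      · -- one digit: the count loop runs exactly once
        have hc : pvCountLoop m 0 = 1 := by
          rw [pvCountLoop_unfold, if_pos hm,
            show PySem.Int.floordiv m 10 = m / 10 from PySem.Int.floordiv_eq_ediv_of_pos (by omega),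
            show m / 10 = 0 from Int.ediv_eq_zero_of_lt (by omega) (by omega),
            pvCountLoop_unfold, if_neg (by omega)]
          norm_num
        rw [pvPrepend_unfold, if_pos hs, hc]
        norm_num
      · have hdiv : PySem.Int.floordiv m 10 = m / 10 :=
          PySem.Int.floordiv_eq_ediv_of_pos (by omega)
        have hq : 0 < m / 10 := (Int.le_ediv_iff_mul_le (by omega)).mpr (by omega)
        have hqk : (m / 10).toNat ≤ k := by omega
        have hc : pvCountLoop m 0 = pvCountLoop (m / 10) 0 + 1 := by
          rw [pvCountLoop_unfold, if_pos (by omega), hdiv, pvCountLoop_acc]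
          ring
        have hmod : PySem.Int.mod m 10 = m % 10 :=
          PySem.Int.mod_of_nonneg m (by omega)
        rw [pvPrepend_unfold, if_neg hs, hdiv, hmod, ih d (m / 10) hq hqk, hc,
          Int.toNat_add (pvCountLoop_nonneg _) (by omega), Int.toNat_one, pow_succ]
        have := Int.emod_add_mul_ediv m 10
        ring_nf
        omega

theorem pvPrepend_eq (d m : Int) (hm : 0 < m) :
    pvPrepend d m = d * 10 ^ (pvCountLoop m 0).toNat + m :=
  pvPrepend_eq_aux m.toNat d m hm le_rfl

-- ===== VERDICT (by name: the statement is the Claim_ definition above) =====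
theorem decode_numbers_spec : Claim_equal_decode_numbers := by
  intro n _
  unfold Spec_decode_numbers decode_numbers decode_numbers_alt
  by_cases h : n < 10
  · simp [h]
  · simp only [h, if_false]
    have hrest : 0 < PySem.Int.floordiv n 10 := by
      rw [PySem.Int.floordiv_eq_ediv_of_pos (by omega)]
      omega
    rw [pvPrepend_eq _ _ hrest]
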